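-- pv_equiv track=rewrite | github.com/mxtdluffy/UNSW-CSE-COURSES | COMP9021/Lab/Lab_3/triples_2.py | find_three_consecutive_numbers
-- ===== SOURCE A (Python) =====
-- def find_three_consecutive_numbers(all_integers):
--     solutions = []
--     for i in range(len(all_integers) - 2):
--         if all_integers[i][0] + 1 == all_integers[i + 1][0] and \
--            all_integers[i + 1][0] + 1 == all_integers[i + 2][0]:
--             solutions.append([[all_integers[i][0], all_integers[i + 1][0], \
--                                all_integers[i + 2][0]], [all_integers[i][1], \
--                                all_integers[i + 1][1], all_integers[i + 2][1]]])
--     return solutions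
-- ===== SOURCE B (Python) =====
-- def _emit(run):
--     # all length-3 windows of a maximal consecutive run, transposed to [keys, values]
--     return [[[run[j][0], run[j + 1][0], run[j + 2][0]],
--              [run[j][1], run[j + 1][1], run[j + 2][1]]]
--             for j in range(len(run) - 2)]
--
--
-- def find_three_consecutive_numbers(all_integers):
--     # Run decomposition: split the list into maximal runs of consecutive first
--     # components, flushing each finished run's length-3 windows into solutions.
--     solutions = []
--     run = []
--     for p in all_integers:
--         if run and p[0] == run[-1][0] + 1:
--             run.append(p)
--         else:
--             solutions += _emit(run)
--             run = [p]
--     solutions += _emit(run)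
--     return solutions
-- ===== Notes on version B (the rewrite author's own statement) =====
-- stated objective: alternative
-- what changed: Replaces A's per-index sliding-window check with a run-decomposition scan: the list is split into maximal runs of consecutive first components via a run accumulator, and each run's length-3 windows are emitted in a separate flush step.
import Mathlib
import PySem

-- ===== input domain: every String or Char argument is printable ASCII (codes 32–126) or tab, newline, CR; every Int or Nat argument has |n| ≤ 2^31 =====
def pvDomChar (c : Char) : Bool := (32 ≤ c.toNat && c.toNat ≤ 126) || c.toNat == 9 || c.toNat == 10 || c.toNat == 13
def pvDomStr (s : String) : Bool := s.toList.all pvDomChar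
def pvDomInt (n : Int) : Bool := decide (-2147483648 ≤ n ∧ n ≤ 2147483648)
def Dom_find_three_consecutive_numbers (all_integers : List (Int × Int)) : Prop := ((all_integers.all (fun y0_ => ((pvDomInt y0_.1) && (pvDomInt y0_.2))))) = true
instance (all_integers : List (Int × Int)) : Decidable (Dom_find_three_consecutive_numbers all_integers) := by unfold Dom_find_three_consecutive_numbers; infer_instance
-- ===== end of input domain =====

-- B replaces A's per-index sliding-window scan with a run-decomposition scan (maximal consecutive runs, flushed per run); alternative decomposition, same cost.


-- ===== PORT A =====
-- the loop body of A: 'if …: solutions.append(…)' (named so the proofs can speak about it)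
def pyBody (all_integers : List (Int × Int)) (solutions : List (List (List Int))) (i : Int) : List (List (List Int)) :=
  if (PySem.List.pyGetD all_integers i (0, 0)).1 + 1 = (PySem.List.pyGetD all_integers (i + 1) (0, 0)).1 ∧
     (PySem.List.pyGetD all_integers (i + 1) (0, 0)).1 + 1 = (PySem.List.pyGetD all_integers (i + 2) (0, 0)).1 then
    solutions ++ [[[(PySem.List.pyGetD all_integers i (0, 0)).1, (PySem.List.pyGetD all_integers (i + 1) (0, 0)).1,
                    (PySem.List.pyGetD all_integers (i + 2) (0, 0)).1],
                   [(PySem.List.pyGetD all_integers i (0, 0)).2, (PySem.List.pyGetD all_integers (i + 1) (0, 0)).2,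
                    (PySem.List.pyGetD all_integers (i + 2) (0, 0)).2]]]
  else solutions

def find_three_consecutive_numbers (all_integers : List (Int × Int)) : List (List (List Int)) :=
  -- solutions = []; for i in range(len(all_integers) - 2): …; return solutions
  (PySem.List.pyRange 0 ((all_integers.length : Int) - 2) 1).foldl (pyBody all_integers) []

-- ===== PORT B =====
-- _emit(run): list comprehension over range(len(run) - 2)
def pyEmit (run : List (Int × Int)) : List (List (List Int)) :=
  (PySem.List.pyRange 0 ((run.length : Int) - 2) 1).map (fun j =>
    [[(PySem.List.pyGetD run j (0, 0)).1, (PySem.List.pyGetD run (j + 1) (0, 0)).1,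
      (PySem.List.pyGetD run (j + 2) (0, 0)).1],
     [(PySem.List.pyGetD run j (0, 0)).2, (PySem.List.pyGetD run (j + 1) (0, 0)).2,
      (PySem.List.pyGetD run (j + 2) (0, 0)).2]])

-- the loop body of B: extend the current run, or flush it and start a new one
def pyGo (st : List (Int × Int) × List (List (List Int))) (p : Int × Int) :
    List (Int × Int) × List (List (List Int)) :=
  if st.1 ≠ [] ∧ p.1 = (PySem.List.pyGetD st.1 (-1) (0, 0)).1 + 1 then
    (st.1 ++ [p], st.2)
  else
    ([p], st.2 ++ pyEmit st.1)

def find_three_consecutive_numbers_alt (all_integers : List (Int × Int)) : List (List (List Int)) :=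
  let st := all_integers.foldl pyGo ([], [])
  st.2 ++ pyEmit st.1

-- ===== PRECONDITION & SPEC =====
def Spec_find_three_consecutive_numbers (all_integers : List (Int × Int)) (out : List (List (List Int))) : Prop := out = find_three_consecutive_numbers_alt all_integers
instance (all_integers : List (Int × Int)) (out : List (List (List Int))) : Decidable (Spec_find_three_consecutive_numbers all_integers out) := by unfold Spec_find_three_consecutive_numbers; infer_instance

-- ===== CLAIM =====
def Claim_equal_find_three_consecutive_numbers : Prop := ∀ (all_integers : List (Int × Int)), Dom_find_three_consecutive_numbers all_integers → Spec_find_three_consecutive_numbers all_integers (find_three_consecutive_numbers all_integers)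

-- ===== LEMMAS AND PROOFS =====

-- recursive characterisation both ports are proved equal to
def triRec : List (Int × Int) → List (List (List Int))
  | x :: y :: z :: rest =>
      (if x.1 + 1 = y.1 ∧ y.1 + 1 = z.1 then [[[x.1, y.1, z.1], [x.2, y.2, z.2]]] else [])
        ++ triRec (y :: z :: rest)
  | _ => []

-- all length-3 windows, unconditionally (recursive form of pyEmit)
def windows3 : List (Int × Int) → List (List (List Int))
  | x :: y :: z :: rest =>
      [[x.1, y.1, z.1], [x.2, y.2, z.2]] :: windows3 (y :: z :: rest)
  | _ => []

lemma pyGetD_cons_succ (x : Int × Int) (xs : List (Int × Int)) (i : Int) (d : Int × Int) (hi : 0 ≤ i) :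
    PySem.List.pyGetD (x :: xs) (i + 1) d = PySem.List.pyGetD xs i d := by
  rw [PySem.List.pyGetD_of_nonneg _ _ (by omega : (0:Int) ≤ i + 1), PySem.List.pyGetD_of_nonneg _ _ hi]
  have : (i + 1).toNat = i.toNat + 1 := by omega
  simp [this]

-- ---- A-side: the range-indexed loop equals triRec ----
lemma A_loop_eq_triRec : ∀ (xs : List (Int × Int)) (acc : List (List (List Int))),
    (PySem.List.pyRange 0 ((xs.length : Int) - 2) 1).foldl (pyBody xs) acc = acc ++ triRec xs
  | [], acc => by simp [PySem.List.pyRange_one_eq_nil, triRec]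
  | [x], acc => by simp [PySem.List.pyRange_one_eq_nil, triRec]
  | [x, y], acc => by simp [PySem.List.pyRange_one_eq_nil, triRec]
  | x :: y :: z :: rest, acc => by
      have ih := A_loop_eq_triRec (y :: z :: rest) (pyBody (x :: y :: z :: rest) acc 0)
      have hlt : (0 : Int) < ((x :: y :: z :: rest).length : Int) - 2 := by
        simp only [List.length_cons]; push_cast; omega
      rw [PySem.List.pyRange_one_cons hlt, List.foldl_cons, show (0:Int)+1 = 1 from by ring]
      rw [PySem.List.pyRange_one 1, List.foldl_map]
      rw [PySem.List.pyRange_one 0, List.foldl_map] at ih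
      have hshift : ∀ (a : List (List (List Int))) (k : Nat), k ∈ List.range ((((x :: y :: z :: rest).length : Int) - 2) - 1).toNat →
          pyBody (x :: y :: z :: rest) a (1 + (k : Int)) = pyBody (y :: z :: rest) a (0 + (k : Int)) := by
        intro a k _
        have e1 : (1 : Int) + (k : Int) = (k : Int) + 1 := by ring
        have e2 : ((k : Int) + 1) + 2 = ((k : Int) + 2) + 1 := by ring
        rw [e1, zero_add]
        simp only [pyBody, e2,
          pyGetD_cons_succ x _ (k : Int) _ (by positivity),
          pyGetD_cons_succ x _ ((k : Int) + 1) _ (by positivity),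
          pyGetD_cons_succ x _ ((k : Int) + 2) _ (by positivity)]
      rw [PySem.List.foldl_congr_mem _ _ _ _ hshift]
      have hn : ((((x :: y :: z :: rest).length : Int) - 2) - 1).toNat = ((((y :: z :: rest).length : Int) - 2) - 0).toNat := by
        simp only [List.length_cons]; omega
      rw [hn, ih]
      have h0 : pyBody (x :: y :: z :: rest) acc 0
          = acc ++ (if x.1 + 1 = y.1 ∧ y.1 + 1 = z.1 then [[[x.1, y.1, z.1], [x.2, y.2, z.2]]] else []) := by
        have : pyBody (x :: y :: z :: rest) acc 0 = pyBody (x :: y :: z :: rest) acc ((0 : Nat) : Int) := by norm_num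
        rw [this]
        simp only [pyBody]
        norm_num [PySem.List.pyGetD_ofNat']
        split <;> simp
      rw [h0, List.append_assoc]
      rfl

-- ---- B-side lemma 1: the range-indexed comprehension equals windows3 ----
lemma pyEmit_eq_windows3 : ∀ run : List (Int × Int), pyEmit run = windows3 run
  | [] => by simp [pyEmit, PySem.List.pyRange_one_eq_nil, windows3]
  | [x] => by simp [pyEmit, PySem.List.pyRange_one_eq_nil, windows3]
  | [x, y] => by simp [pyEmit, PySem.List.pyRange_one_eq_nil, windows3]
  | x :: y :: z :: rest => by
      have ih := pyEmit_eq_windows3 (y :: z :: rest)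
      have hlt : (0 : Int) < ((x :: y :: z :: rest).length : Int) - 2 := by
        simp only [List.length_cons]; push_cast; omega
      unfold pyEmit
      rw [PySem.List.pyRange_one_cons hlt, List.map_cons, show (0:Int)+1 = 1 from by ring]
      rw [PySem.List.pyRange_one 1, List.map_map]
      simp only [Function.comp_def]
      unfold pyEmit at ih
      rw [PySem.List.pyRange_one 0, List.map_map] at ih
      simp only [Function.comp_def] at ih
      have hshift : ∀ k ∈ List.range ((((x :: y :: z :: rest).length : Int) - 2) - 1).toNat,
          [[(PySem.List.pyGetD (x :: y :: z :: rest) (1 + (k : Int)) (0, 0)).1,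
            (PySem.List.pyGetD (x :: y :: z :: rest) (1 + (k : Int) + 1) (0, 0)).1,
            (PySem.List.pyGetD (x :: y :: z :: rest) (1 + (k : Int) + 2) (0, 0)).1],
           [(PySem.List.pyGetD (x :: y :: z :: rest) (1 + (k : Int)) (0, 0)).2,
            (PySem.List.pyGetD (x :: y :: z :: rest) (1 + (k : Int) + 1) (0, 0)).2,
            (PySem.List.pyGetD (x :: y :: z :: rest) (1 + (k : Int) + 2) (0, 0)).2]]
          = [[(PySem.List.pyGetD (y :: z :: rest) (0 + (k : Int)) (0, 0)).1,
              (PySem.List.pyGetD (y :: z :: rest) (0 + (k : Int) + 1) (0, 0)).1,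
              (PySem.List.pyGetD (y :: z :: rest) (0 + (k : Int) + 2) (0, 0)).1],
             [(PySem.List.pyGetD (y :: z :: rest) (0 + (k : Int)) (0, 0)).2,
              (PySem.List.pyGetD (y :: z :: rest) (0 + (k : Int) + 1) (0, 0)).2,
              (PySem.List.pyGetD (y :: z :: rest) (0 + (k : Int) + 2) (0, 0)).2]] := by
        intro k _
        have e1 : (1 : Int) + (k : Int) = (k : Int) + 1 := by ring
        have e2 : ((k : Int) + 1) + 2 = ((k : Int) + 2) + 1 := by ring
        rw [e1, zero_add]
        simp only [e2,
          pyGetD_cons_succ x _ (k : Int) _ (by positivity),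
          pyGetD_cons_succ x _ ((k : Int) + 1) _ (by positivity),
          pyGetD_cons_succ x _ ((k : Int) + 2) _ (by positivity)]
      rw [List.map_congr_left hshift]
      have hn : ((((x :: y :: z :: rest).length : Int) - 2) - 1).toNat = ((((y :: z :: rest).length : Int) - 2) - 0).toNat := by
        simp only [List.length_cons]; omega
      rw [hn, ih, windows3]
      congr 1
      norm_num [PySem.List.pyGetD_ofNat']

-- ---- B-side lemma 2: on a consecutive run, triRec keeps every window ----
lemma triRec_of_chain : ∀ run : List (Int × Int),
    List.IsChain (fun a b : Int × Int => a.1 + 1 = b.1) run → triRec run = windows3 run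
  | [], _ => rfl
  | [x], _ => rfl
  | [x, y], _ => rfl
  | x :: y :: z :: rest, h => by
      rcases List.isChain_cons.mp h with ⟨h1, h'⟩
      rcases List.isChain_cons.mp h' with ⟨h2, _⟩
      rw [triRec, windows3, if_pos ⟨h1 y (by simp), h2 z (by simp)⟩,
        triRec_of_chain (y :: z :: rest) h']
      rfl

-- ---- B-side lemma 3: triRec splits at a break of consecutiveness ----
lemma triRec_break : ∀ (r : List (Int × Int)) (hr : r ≠ []) (q : Int × Int) (ys : List (Int × Int)),
    q.1 ≠ (r.getLast hr).1 + 1 → triRec (r ++ q :: ys) = triRec r ++ triRec (q :: ys)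
  | [a], _, q, ys, h => by
      cases ys with
      | nil => simp [triRec]
      | cons y ys' =>
          simp only [List.getLast] at h
          rw [List.singleton_append,
            show triRec (a :: q :: y :: ys') =
              (if a.1 + 1 = q.1 ∧ q.1 + 1 = y.1 then [[[a.1, q.1, y.1], [a.2, q.2, y.2]]] else [])
                ++ triRec (q :: y :: ys') from rfl,
            if_neg (by rintro ⟨hc, -⟩; exact h hc.symm)]
          simp [triRec]
  | a :: b :: r'', hr, q, ys, h => by
      have hb : (b :: r'') ≠ [] := by simp
      have hlast : (b :: r'').getLast hb = (a :: b :: r'').getLast hr := by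
        simp [List.getLast]
      have ih := triRec_break (b :: r'') hb q ys (by rw [hlast]; exact h)
      cases r'' with
      | nil =>
          have hcond : ¬ (a.1 + 1 = b.1 ∧ b.1 + 1 = q.1) := by
            rintro ⟨_, h2⟩
            exact h (by simpa [List.getLast] using h2.symm)
          simp only [List.cons_append, List.nil_append]
          rw [triRec, if_neg hcond]
          simpa [triRec] using ih
      | cons c t =>
          simp only [List.cons_append] at ih ⊢
          rw [triRec, ih, show triRec (a :: b :: c :: t) =
            (if a.1 + 1 = b.1 ∧ b.1 + 1 = c.1 then [[[a.1, b.1, c.1], [a.2, b.2, c.2]]] else [])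
              ++ triRec (b :: c :: t) from rfl, List.append_assoc]

-- ---- B-side main loop invariant ----
lemma B_loop_eq_triRec : ∀ (xs run : List (Int × Int)) (sols : List (List (List Int))),
    List.IsChain (fun a b : Int × Int => a.1 + 1 = b.1) run → run ≠ [] →
    (xs.foldl pyGo (run, sols)).2 ++ pyEmit (xs.foldl pyGo (run, sols)).1
      = sols ++ triRec (run ++ xs)
  | [], run, sols, hch, hr => by
      simp only [List.foldl_nil, List.append_nil]
      rw [pyEmit_eq_windows3, ← triRec_of_chain run hch]
  | p :: xs, run, sols, hch, hr => by
      rw [List.foldl_cons]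
      by_cases hp : p.1 = (run.getLast hr).1 + 1
      · have hgo : pyGo (run, sols) p = (run ++ [p], sols) := by
          simp only [pyGo]
          rw [if_pos ⟨hr, by rw [PySem.List.pyGetD_neg_one run (0,0) hr]; exact hp⟩]
        have hch' : List.IsChain (fun a b : Int × Int => a.1 + 1 = b.1) (run ++ [p]) := by
          apply List.IsChain.append hch (List.isChain_singleton p)
          intro a ha b hb
          simp only [List.head?_cons, Option.mem_def, Option.some.injEq] at hb
          rw [List.getLast?_eq_some_getLast hr, Option.mem_def, Option.some.injEq] at ha
          subst ha; subst hb; exact hp.symm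
        rw [hgo, B_loop_eq_triRec xs (run ++ [p]) sols hch' (by simp), List.append_assoc]
        rfl
      · have hgo : pyGo (run, sols) p = ([p], sols ++ pyEmit run) := by
          simp only [pyGo]
          rw [if_neg]
          rintro ⟨_, hc⟩
          rw [PySem.List.pyGetD_neg_one run (0,0) hr] at hc
          exact hp hc
        rw [hgo, B_loop_eq_triRec xs [p] (sols ++ pyEmit run) (List.isChain_singleton p) (by simp)]
        rw [pyEmit_eq_windows3, ← triRec_of_chain run hch, List.append_assoc,
          List.singleton_append, ← triRec_break run hr p xs (fun hc => hp hc)]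

lemma B_eq_triRec (xs : List (Int × Int)) : find_three_consecutive_numbers_alt xs = triRec xs := by
  cases xs with
  | nil => rfl
  | cons p rest =>
      unfold find_three_consecutive_numbers_alt
      rw [List.foldl_cons]
      have hgo : pyGo ([], []) p = ([p], []) := by
        simp [pyGo, pyEmit, PySem.List.pyRange_one_eq_nil]
      rw [hgo]
      simpa using B_loop_eq_triRec rest [p] [] (List.isChain_singleton p) (by simp)

-- ===== VERDICT =====
theorem find_three_consecutive_numbers_spec : Claim_equal_find_three_consecutive_numbers := by
  intro xs _
  unfold Spec_find_three_consecutive_numbers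
  rw [B_eq_triRec]
  unfold find_three_consecutive_numbers
  simpa using A_loop_eq_triRec xs []
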